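-- pv_equiv track=rewrite | github.com/daniel-reich/ubiquitous-fiesta | jTBQTDQ568ppnGvq7_4.py | digit_sort
-- ===== SOURCE A (Python) =====
-- def digit_sort(lst):
--   tenthou, thou, hun, ten, digi = [],[],[],[],[]
--   for i in lst:
--     if i < 10: digi.append(i)
--     elif i < 100: ten.append(i)
--     elif i < 1000: hun.append(i)
--     elif i < 10000: thou.append(i)
--     else: tenthou.append(i)
--   return sorted(tenthou) + sorted(thou) + sorted(hun) + sorted(ten) + sorted(digi)
-- ===== SOURCE B (Python) =====
-- def digit_sort(lst):
--     def rank(x):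
--         if x >= 10000: return 0
--         if x >= 1000: return 1
--         if x >= 100: return 2
--         if x >= 10: return 3
--         return 4
--     return sorted(lst, key=lambda x: (rank(x), x))
-- ===== Notes on version B (the rewrite author's own statement) =====
-- stated objective: simpler
-- what changed: replaces the five explicit bucket lists, five separate sorts and a concatenation by a single sorted() call with a composite (bucket-rank, value) key
import Mathlib
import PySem

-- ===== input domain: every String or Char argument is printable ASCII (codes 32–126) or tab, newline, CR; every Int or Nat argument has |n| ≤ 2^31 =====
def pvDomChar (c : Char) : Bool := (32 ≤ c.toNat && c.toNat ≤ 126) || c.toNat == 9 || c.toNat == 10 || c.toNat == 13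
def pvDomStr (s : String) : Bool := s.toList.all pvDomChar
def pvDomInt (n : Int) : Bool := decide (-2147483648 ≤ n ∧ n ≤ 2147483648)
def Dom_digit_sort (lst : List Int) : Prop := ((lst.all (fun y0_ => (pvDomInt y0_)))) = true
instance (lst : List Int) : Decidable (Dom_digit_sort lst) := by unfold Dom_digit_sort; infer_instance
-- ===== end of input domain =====

-- B replaces A's five bucket lists, five separate sorts and concatenation by a single sort with a composite (rank, value) key; objective: simpler.


-- ===== PORT A =====
-- the loop's five accumulators (tenthou, thou, hun, ten, digi), branches in A's order
def digitSortStep (st : List Int × List Int × List Int × List Int × List Int) (i : Int) :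
    List Int × List Int × List Int × List Int × List Int :=
  if i < 10 then (st.1, st.2.1, st.2.2.1, st.2.2.2.1, st.2.2.2.2 ++ [i])
  else if i < 100 then (st.1, st.2.1, st.2.2.1, st.2.2.2.1 ++ [i], st.2.2.2.2)
  else if i < 1000 then (st.1, st.2.1, st.2.2.1 ++ [i], st.2.2.2.1, st.2.2.2.2)
  else if i < 10000 then (st.1, st.2.1 ++ [i], st.2.2.1, st.2.2.2.1, st.2.2.2.2)
  else (st.1 ++ [i], st.2.1, st.2.2.1, st.2.2.2.1, st.2.2.2.2)

def digit_sort (lst : List Int) : List Int :=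
  let st := lst.foldl digitSortStep ([], [], [], [], [])
  PySem.List.sorted st.1 (fun x => x) ++ PySem.List.sorted st.2.1 (fun x => x) ++
  PySem.List.sorted st.2.2.1 (fun x => x) ++ PySem.List.sorted st.2.2.2.1 (fun x => x) ++
  PySem.List.sorted st.2.2.2.2 (fun x => x)

-- ===== PORT B =====
def digitSortRank (x : Int) : Int :=
  if 10000 ≤ x then 0 else if 1000 ≤ x then 1 else if 100 ≤ x then 2 else if 10 ≤ x then 3 else 4

def digit_sort_alt (lst : List Int) : List Int :=
  PySem.List.sorted2 lst digitSortRank (fun x => x) false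

-- ===== PRECONDITION & SPEC =====
def Spec_digit_sort (lst : List Int) (out : List Int) : Prop := out = digit_sort_alt lst
instance (lst : List Int) (out : List Int) : Decidable (Spec_digit_sort lst out) := by unfold Spec_digit_sort; infer_instance

-- ===== CLAIM (what is proved, stated in full; the proofs are below) =====
def Claim_equal_digit_sort : Prop := ∀ (lst : List Int), Dom_digit_sort lst → Spec_digit_sort lst (digit_sort lst)

-- ===== LEMMAS AND PROOFS =====

-- the composite (rank, value) key, as one lexicographic value
def digitSortKey (x : Int) : Lex (Int × Int) := toLex (digitSortRank x, x)

theorem digitSortKey_inj : Function.Injective digitSortKey := by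
  intro a b h
  have := congrArg (fun p => (ofLex p).2) h
  simpa [digitSortKey] using this

theorem digitSortKey_le {a b : Int}
    (h : digitSortRank a < digitSortRank b ∨ (digitSortRank a = digitSortRank b ∧ a ≤ b)) :
    digitSortKey a ≤ digitSortKey b := by
  simp only [digitSortKey, Prod.Lex.le_iff, ofLex_toLex]
  exact h

-- B's sorted2 equals sorted with the lexicographic key (their insertion orders agree)
theorem alt_eq_sorted_key (lst : List Int) :
    digit_sort_alt lst = PySem.List.sorted lst digitSortKey false := by
  show List.foldl (fun acc x => PySem.List.insertBy
      (fun a b => decide (digitSortRank a < digitSortRank b) ||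
        (!decide (digitSortRank b < digitSortRank a) && decide (a < b))) x acc) [] lst
    = List.foldl (fun acc x =>
        PySem.List.insertBy (fun a b => decide (digitSortKey a < digitSortKey b)) x acc) [] lst
  have h : (fun a b => decide (digitSortRank a < digitSortRank b) ||
        (!decide (digitSortRank b < digitSortRank a) && decide (a < b)))
      = fun a b => decide (digitSortKey a < digitSortKey b) := by
    funext a b
    rw [Bool.eq_iff_iff]
    simp only [digitSortKey, Bool.or_eq_true, Bool.and_eq_true, Bool.not_eq_true',
      decide_eq_true_iff, decide_eq_false_iff_not, Prod.Lex.lt_iff, ofLex_toLex]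
    omega
  rw [h]

-- the five buckets together are a permutation of the input
theorem fold_perm (lst : List Int) (a b c d e : List Int) :
    ((lst.foldl digitSortStep (a, b, c, d, e)).1 ++ (lst.foldl digitSortStep (a, b, c, d, e)).2.1 ++
     (lst.foldl digitSortStep (a, b, c, d, e)).2.2.1 ++
     (lst.foldl digitSortStep (a, b, c, d, e)).2.2.2.1 ++
     (lst.foldl digitSortStep (a, b, c, d, e)).2.2.2.2).Perm
    ((a ++ b ++ c ++ d ++ e) ++ lst) := by
  induction lst generalizing a b c d e with
  | nil => simp
  | cons i t ih =>
    simp only [List.foldl_cons, digitSortStep]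
    split_ifs with h1 h2 h3 h4 <;>
    · refine (ih _ _ _ _ _).trans ?_
      rw [← Multiset.coe_eq_coe]
      simp only [← Multiset.coe_add, ← Multiset.singleton_add, ← Multiset.cons_coe]
      abel

-- every bucket holds exactly its magnitude range
theorem fold_bounds (lst : List Int) (a b c d e : List Int)
    (h1 : ∀ x ∈ a, 10000 ≤ x) (h2 : ∀ x ∈ b, 1000 ≤ x ∧ x < 10000)
    (h3 : ∀ x ∈ c, 100 ≤ x ∧ x < 1000) (h4 : ∀ x ∈ d, 10 ≤ x ∧ x < 100)
    (h5 : ∀ x ∈ e, x < 10) :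
    (∀ x ∈ (lst.foldl digitSortStep (a, b, c, d, e)).1, 10000 ≤ x) ∧
    (∀ x ∈ (lst.foldl digitSortStep (a, b, c, d, e)).2.1, 1000 ≤ x ∧ x < 10000) ∧
    (∀ x ∈ (lst.foldl digitSortStep (a, b, c, d, e)).2.2.1, 100 ≤ x ∧ x < 1000) ∧
    (∀ x ∈ (lst.foldl digitSortStep (a, b, c, d, e)).2.2.2.1, 10 ≤ x ∧ x < 100) ∧
    (∀ x ∈ (lst.foldl digitSortStep (a, b, c, d, e)).2.2.2.2, x < 10) := by
  induction lst generalizing a b c d e with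
  | nil => exact ⟨h1, h2, h3, h4, h5⟩
  | cons i t ih =>
    simp only [List.foldl_cons, digitSortStep]
    split_ifs with g1 g2 g3 g4 <;>
    · refine ih _ _ _ _ _ ?_ ?_ ?_ ?_ ?_ <;>
      · intro x hx
        first
        | (rcases List.mem_append.mp hx with hx | hx
           · first | exact h1 x hx | exact h2 x hx | exact h3 x hx | exact h4 x hx | exact h5 x hx
           · simp only [List.mem_singleton] at hx; subst hx; omega)
        | exact h1 x hx | exact h2 x hx | exact h3 x hx | exact h4 x hx | exact h5 x hx

theorem rank_of_bounds {x : Int} :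
    (10000 ≤ x → digitSortRank x = 0) ∧ (1000 ≤ x ∧ x < 10000 → digitSortRank x = 1) ∧
    (100 ≤ x ∧ x < 1000 → digitSortRank x = 2) ∧ (10 ≤ x ∧ x < 100 → digitSortRank x = 3) ∧
    (x < 10 → digitSortRank x = 4) := by
  unfold digitSortRank
  split_ifs <;> omega

theorem pw_key_append {l1 l2 : List Int}
    (p1 : l1.Pairwise (fun p q => digitSortKey p ≤ digitSortKey q))
    (p2 : l2.Pairwise (fun p q => digitSortKey p ≤ digitSortKey q))
    (hc : ∀ p ∈ l1, ∀ q ∈ l2, digitSortKey p ≤ digitSortKey q) :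
    (l1 ++ l2).Pairwise (fun p q => digitSortKey p ≤ digitSortKey q) :=
  List.pairwise_append.mpr ⟨p1, p2, hc⟩

-- a sorted bucket whose members all have rank r is pairwise key-ordered
theorem pw_key_bucket (l : List Int) (r : Int) (hr : ∀ x ∈ l, digitSortRank x = r) :
    (PySem.List.sorted l (fun x => x)).Pairwise (fun p q => digitSortKey p ≤ digitSortKey q) := by
  have hp := PySem.List.sorted_pairwise l (fun x => x)
  refine hp.imp_of_mem ?_
  intro p q hpm hqm hle
  have hp' : digitSortRank p = r := hr p ((PySem.List.mem_sorted _ _ _ _).mp hpm)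
  have hq' : digitSortRank q = r := hr q ((PySem.List.mem_sorted _ _ _ _).mp hqm)
  exact digitSortKey_le (Or.inr ⟨hp'.trans hq'.symm, hle⟩)

-- ===== VERDICT (by name: the statement is the Claim_ definition above) =====
theorem digit_sort_spec : Claim_equal_digit_sort := by
  intro lst _
  unfold Spec_digit_sort
  set st := lst.foldl digitSortStep ([], [], [], [], []) with hst
  set ys := digit_sort lst with hys
  have hys' : ys = PySem.List.sorted st.1 (fun x => x) ++ PySem.List.sorted st.2.1 (fun x => x) ++
      PySem.List.sorted st.2.2.1 (fun x => x) ++ PySem.List.sorted st.2.2.2.1 (fun x => x) ++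
      PySem.List.sorted st.2.2.2.2 (fun x => x) := rfl
  -- permutation
  have hperm : ys.Perm lst := by
    rw [hys']
    have h1 := PySem.List.sorted_perm st.1 (fun x => x) false
    have h2 := PySem.List.sorted_perm st.2.1 (fun x => x) false
    have h3 := PySem.List.sorted_perm st.2.2.1 (fun x => x) false
    have h4 := PySem.List.sorted_perm st.2.2.2.1 (fun x => x) false
    have h5 := PySem.List.sorted_perm st.2.2.2.2 (fun x => x) false
    have := ((((h1.append h2).append h3).append h4).append h5).trans (fold_perm lst [] [] [] [] [])
    simpa using this
  -- bounds and ranks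
  obtain ⟨b1, b2, b3, b4, b5⟩ := fold_bounds lst [] [] [] [] []
    (by simp) (by simp) (by simp) (by simp) (by simp)
  have r1 : ∀ x ∈ st.1, digitSortRank x = 0 := fun x hx => rank_of_bounds.1 (b1 x hx)
  have r2 : ∀ x ∈ st.2.1, digitSortRank x = 1 := fun x hx => rank_of_bounds.2.1 (b2 x hx)
  have r3 : ∀ x ∈ st.2.2.1, digitSortRank x = 2 := fun x hx => rank_of_bounds.2.2.1 (b3 x hx)
  have r4 : ∀ x ∈ st.2.2.2.1, digitSortRank x = 3 := fun x hx => rank_of_bounds.2.2.2.1 (b4 x hx)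
  have r5 : ∀ x ∈ st.2.2.2.2, digitSortRank x = 4 := fun x hx => rank_of_bounds.2.2.2.2 (b5 x hx)
  -- pairwise key order of A's output
  have hpw : ys.Pairwise (fun p q => digitSortKey p ≤ digitSortKey q) := by
    rw [hys']
    have m1 : ∀ p ∈ PySem.List.sorted st.1 (fun x => x), digitSortRank p = 0 :=
      fun p hp => r1 p ((PySem.List.mem_sorted _ _ _ _).mp hp)
    have m2 : ∀ p ∈ PySem.List.sorted st.2.1 (fun x => x), digitSortRank p = 1 :=
      fun p hp => r2 p ((PySem.List.mem_sorted _ _ _ _).mp hp)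
    have m3 : ∀ p ∈ PySem.List.sorted st.2.2.1 (fun x => x), digitSortRank p = 2 :=
      fun p hp => r3 p ((PySem.List.mem_sorted _ _ _ _).mp hp)
    have m4 : ∀ p ∈ PySem.List.sorted st.2.2.2.1 (fun x => x), digitSortRank p = 3 :=
      fun p hp => r4 p ((PySem.List.mem_sorted _ _ _ _).mp hp)
    have m5 : ∀ p ∈ PySem.List.sorted st.2.2.2.2 (fun x => x), digitSortRank p = 4 :=
      fun p hp => r5 p ((PySem.List.mem_sorted _ _ _ _).mp hp)
    have m12 : ∀ p ∈ PySem.List.sorted st.1 (fun x => x) ++ PySem.List.sorted st.2.1 (fun x => x),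
        digitSortRank p ≤ 1 := by
      intro p hp
      rcases List.mem_append.mp hp with hp | hp
      · have := m1 p hp; omega
      · have := m2 p hp; omega
    have m123 : ∀ p ∈ PySem.List.sorted st.1 (fun x => x) ++ PySem.List.sorted st.2.1 (fun x => x)
        ++ PySem.List.sorted st.2.2.1 (fun x => x), digitSortRank p ≤ 2 := by
      intro p hp
      rcases List.mem_append.mp hp with hp | hp
      · have := m12 p hp; omega
      · have := m3 p hp; omega
    have m1234 : ∀ p ∈ PySem.List.sorted st.1 (fun x => x) ++ PySem.List.sorted st.2.1 (fun x => x)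
        ++ PySem.List.sorted st.2.2.1 (fun x => x) ++ PySem.List.sorted st.2.2.2.1 (fun x => x),
        digitSortRank p ≤ 3 := by
      intro p hp
      rcases List.mem_append.mp hp with hp | hp
      · have := m123 p hp; omega
      · have := m4 p hp; omega
    refine pw_key_append (pw_key_append (pw_key_append (pw_key_append
      (pw_key_bucket _ 0 r1) (pw_key_bucket _ 1 r2) ?_)
      (pw_key_bucket _ 2 r3) ?_) (pw_key_bucket _ 3 r4) ?_) (pw_key_bucket _ 4 r5) ?_
    · intro p hp q hq
      exact digitSortKey_le (Or.inl (by have := m1 p hp; have := m2 q hq; omega))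
    · intro p hp q hq
      exact digitSortKey_le (Or.inl (by have := m12 p hp; have := m3 q hq; omega))
    · intro p hp q hq
      exact digitSortKey_le (Or.inl (by have := m123 p hp; have := m4 q hq; omega))
    · intro p hp q hq
      exact digitSortKey_le (Or.inl (by have := m1234 p hp; have := m5 q hq; omega))
  -- conclude
  rw [alt_eq_sorted_key,
    PySem.List.sorted_eq_sorted_of_perm lst ys digitSortKey digitSortKey_inj hperm.symm]
  exact (PySem.List.sorted_eq_self_of_pairwise ys digitSortKey hpw).symm
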